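-- pv_equiv track=rewrite | github.com/iamsuman/algorithms | iv/Arrays/duplicate_array.py | duplicate_array
-- ===== SOURCE A (Python) =====
-- def duplicate_array(A):
--     # A = [1, 2, 3, 3, 4, 4, 5]
--     n = len(A)
--     start = 0
--     while start < n - 2:
--         if A[start] < A[start + 1]:
--             start = start + 1
--             continue
--         else:
--             for end in range(start + 1, n):
--                 if A[start] >= A[end]:
--                     continue
--                 else:
--                     A[start + 1] = A[end]
--                     break
--         start = start + 1
--     return A
-- ===== SOURCE B (Python) =====
-- def duplicate_array(A):
--     # Single forward pass over the ORIGINAL values with a source-index chain: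
--     # the value currently at position s is A[src], and everything between s and
--     # src is known to be <= A[src], so each search can resume at src + 1 instead
--     # of rescanning from s + 1.  Builds a new list (does not mutate A; A's
--     # in-place mutation is observable to the caller, equivalence is about the
--     # return value).
--     n = len(A)
--     out = list(A)
--     src = 0
--     for s in range(n - 2):
--         if out[s] >= A[s + 1]:
--             j = src + 1
--             while j < n and A[j] <= out[s]:
--                 j += 1
--             if j < n:
--                 out[s + 1] = A[j]
--                 src = j
--             else:
--                 src = s + 1
--         else:
--             src = s + 1
--     return out
-- ===== Notes on version B (the rewrite author's own statement) =====
-- stated objective: alternative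
-- what changed: A mutates the array in place, rescanning from start+1 on every stall; B builds a new list in one forward pass keeping a source-index chain (the original index whose value now sits at position s), so each search for the next greater value resumes where the previous one ended instead of rescanning the skipped region.
import Mathlib
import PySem

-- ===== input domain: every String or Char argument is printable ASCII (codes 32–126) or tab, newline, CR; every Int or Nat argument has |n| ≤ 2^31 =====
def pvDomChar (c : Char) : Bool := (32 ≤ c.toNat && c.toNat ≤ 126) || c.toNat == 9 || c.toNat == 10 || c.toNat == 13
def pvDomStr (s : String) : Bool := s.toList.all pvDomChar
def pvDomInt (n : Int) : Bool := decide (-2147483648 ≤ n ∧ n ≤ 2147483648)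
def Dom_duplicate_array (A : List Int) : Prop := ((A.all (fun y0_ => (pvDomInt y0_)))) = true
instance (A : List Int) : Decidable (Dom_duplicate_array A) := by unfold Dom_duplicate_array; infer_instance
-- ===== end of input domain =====

-- B replaces A's rescan-from-start inner loop by a single forward source-index chain
-- (searches resume where the previous one ended); equivalence is about the RETURN value
-- only: the Python A mutates its argument in place, B builds a new list.

-- ===== PORT A =====
-- inner 'for end in range(e, n): if A[start] >= A[end]: continue else: A[start+1] = A[end]; break'
-- all indices are Nat and in range, so List.getD _ 0 is exact here
def dupA_for (arr : List Int) (s e n : Nat) : List Int :=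
  if e < n then
    if arr.getD s 0 ≥ arr.getD e 0 then dupA_for arr s (e + 1) n
    else arr.set (s + 1) (arr.getD e 0)
  else arr
termination_by n - e

-- 'while start < n - 2: …' (both branches end in start = start + 1)
def dupA_while (arr : List Int) (start n : Nat) : List Int :=
  if start + 2 < n then
    dupA_while
      (if arr.getD start 0 < arr.getD (start + 1) 0 then arr
       else dupA_for arr start (start + 1) n)
      (start + 1) n
  else arr
termination_by n - start

def duplicate_array (A : List Int) : List Int := dupA_while A 0 A.length

-- ===== PORT B =====
-- 'j = j0; while j < n and A[j] <= v: j += 1'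
def dupB_scan (A : List Int) (v : Int) (j n : Nat) : Nat :=
  if j < n then
    if A.getD j 0 ≤ v then dupB_scan A v (j + 1) n else j
  else j
termination_by n - j

-- 'for s in range(n-2): …' with state (out, src)
def dupB_loop (A out : List Int) (src s n : Nat) : List Int :=
  if s + 2 < n then
    if out.getD s 0 ≥ A.getD (s + 1) 0 then
      let j := dupB_scan A (out.getD s 0) (src + 1) n
      if j < n then dupB_loop A (out.set (s + 1) (A.getD j 0)) j (s + 1) n
      else dupB_loop A out (s + 1) (s + 1) n
    else dupB_loop A out (s + 1) (s + 1) n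
  else out
termination_by n - s

def duplicate_array_alt (A : List Int) : List Int := dupB_loop A A 0 0 A.length

-- ===== PRECONDITION & SPEC =====
def Spec_duplicate_array (A : List Int) (out : List Int) : Prop := out = duplicate_array_alt A
instance (A : List Int) (out : List Int) : Decidable (Spec_duplicate_array A out) := by unfold Spec_duplicate_array; infer_instance

-- ===== CLAIM (what is proved, stated in full; the proofs are below) =====
def Claim_equal_duplicate_array : Prop := ∀ (A : List Int), Dom_duplicate_array A → Spec_duplicate_array A (duplicate_array A)

-- ===== LEMMAS AND PROOFS =====

lemma getD_set_ne (l : List Int) (i j : Nat) (a : Int) (h : i ≠ j) :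
    (l.set i a).getD j 0 = l.getD j 0 := by
  simp [List.getD, List.getElem?_set_ne h]

lemma getD_set_self (l : List Int) (i : Nat) (a : Int) (h : i < l.length) :
    (l.set i a).getD i 0 = a := by
  simp [List.getD, h]

-- dupB_scan returns the first index ≥ j0 (and < n) whose value exceeds v, or n
lemma scan_spec (A : List Int) (v : Int) (n : Nat) :
    ∀ j0, j0 ≤ n →
      j0 ≤ dupB_scan A v j0 n ∧ dupB_scan A v j0 n ≤ n ∧
      (∀ k, j0 ≤ k → k < dupB_scan A v j0 n → A.getD k 0 ≤ v) ∧
      (dupB_scan A v j0 n < n → v < A.getD (dupB_scan A v j0 n) 0) := by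
  intro j0
  induction' hf : n - j0 using Nat.strong_induction_on with f ih generalizing j0
  intro hle
  rw [dupB_scan]
  by_cases hjn : j0 < n
  · simp only [hjn, if_true]
    by_cases hv : A.getD j0 0 ≤ v
    · simp only [hv, if_true]
      have := ih (n - (j0 + 1)) (by omega) (j0 + 1) rfl (by omega)
      refine ⟨by omega, this.2.1, ?_, this.2.2.2⟩
      intro k hk1 hk2
      rcases Nat.eq_or_lt_of_le hk1 with h | h
      · exact h ▸ hv
      · exact this.2.2.1 k h hk2
    · simp only [hv, if_false]
      exact ⟨le_refl _, by omega, by omega, fun _ => by omega⟩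
  · simp only [hjn, if_false]
    exact ⟨le_refl _, hle, by omega, fun h => h.elim⟩

-- a scan may start anywhere inside a prefix of values ≤ v
lemma scan_shift (A : List Int) (v : Int) (n : Nat) :
    ∀ a b, a ≤ b → b ≤ n → (∀ k, a ≤ k → k < b → A.getD k 0 ≤ v) →
      dupB_scan A v a n = dupB_scan A v b n := by
  intro a b
  induction' hf : b - a using Nat.strong_induction_on with f ih generalizing a
  intro hab hbn hsk
  rcases Nat.eq_or_lt_of_le hab with h | h
  · rw [h]
  · rw [dupB_scan]
    have han : a < n := by omega
    simp only [han, if_true, hsk a (le_refl _) h, if_true]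
    exact ih (b - (a + 1)) (by omega) (a + 1) rfl (by omega) hbn
      (fun k hk1 hk2 => hsk k (by omega) hk2)

-- A's inner for-loop, expressed through dupB_scan (the suffix of arr past s is original)
lemma forA (Aorig arr : List Int) (s n : Nat)
    (hsuf : ∀ k, s < k → arr.getD k 0 = Aorig.getD k 0) :
    ∀ e, s < e →
      dupA_for arr s e n =
        (if dupB_scan Aorig (arr.getD s 0) e n < n
         then arr.set (s + 1) (Aorig.getD (dupB_scan Aorig (arr.getD s 0) e n) 0)
         else arr) := by
  intro e
  induction' hf : n - e using Nat.strong_induction_on with f ih generalizing e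
  intro hse
  rw [dupA_for, dupB_scan]
  by_cases hen : e < n
  · simp only [hen, if_true]
    rw [hsuf e hse]
    by_cases hv : arr.getD s 0 ≥ Aorig.getD e 0
    · simp only [hv, if_true]
      exact ih (n - (e + 1)) (by omega) (e + 1) rfl (by omega)
    · simp only [hv, if_false, hen, if_true]
  · simp only [hen, if_false]

-- main simulation: A's while-loop state equals B's loop state, with the chain invariant
lemma sim (Aorig : List Int) (n : Nat) (hn : n = Aorig.length) :
    ∀ s src (arr : List Int),
      arr.length = n →
      (∀ k, s < k → arr.getD k 0 = Aorig.getD k 0) →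
      s ≤ src →
      (src = s ∨ src < n) →
      arr.getD s 0 = Aorig.getD src 0 →
      (∀ k, s < k → k ≤ src → Aorig.getD k 0 ≤ Aorig.getD src 0) →
      dupA_while arr s n = dupB_loop Aorig arr src s n := by
  intro s
  induction' hf : n - s using Nat.strong_induction_on with f ih generalizing s
  intro src arr hlen hsuf hsrc hsrcn hsv hmid
  rw [dupA_while, dupB_loop]
  by_cases hsn : s + 2 < n
  · simp only [hsn, if_true]
    have hsrcn' : src < n := by rcases hsrcn with h | h <;> omega
    by_cases hcond : arr.getD s 0 < arr.getD (s + 1) 0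
    · -- A continues; B's condition out[s] >= A[s+1] is false
      have hB : ¬ arr.getD s 0 ≥ Aorig.getD (s + 1) 0 := by
        rw [← hsuf (s + 1) (by omega)]; omega
      simp only [if_pos hcond, if_neg hB]
      exact ih (n - (s + 1)) (by omega) (s + 1) rfl (s + 1) arr hlen
        (fun k hk => hsuf k (by omega)) (le_refl _) (Or.inl rfl)
        (hsuf (s + 1) (by omega)) (by omega)
    · have hge : arr.getD s 0 ≥ Aorig.getD (s + 1) 0 := by
        rw [← hsuf (s + 1) (by omega)]; omega
      simp only [if_neg hcond, if_pos hge]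
      -- the two scans agree: elements in (s, src] are ≤ v
      have hshift : dupB_scan Aorig (arr.getD s 0) (s + 1) n
          = dupB_scan Aorig (arr.getD s 0) (src + 1) n := by
        apply scan_shift
        · omega
        · omega
        · intro k hk1 hk2
          rw [hsv]
          exact hmid k (by omega) (by omega)
      have hspec := scan_spec Aorig (arr.getD s 0) n (src + 1) (by omega)
      rw [forA Aorig arr s n hsuf (s + 1) (by omega), hshift]
      set j := dupB_scan Aorig (arr.getD s 0) (src + 1) n with hj
      by_cases hjn : j < n
      · simp only [if_pos hjn]
        have hjs : s + 1 ≤ j := by omega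
        have hvj : arr.getD s 0 < Aorig.getD j 0 := hspec.2.2.2 hjn
        apply ih (n - (s + 1)) (by omega) (s + 1) rfl j _ (by simp [hlen])
        · intro k hk
          exact (getD_set_ne arr (s + 1) k _ (by omega)).trans (hsuf k (by omega))
        · exact hjs
        · exact Or.inr hjn
        · exact getD_set_self arr (s + 1) _ (by omega)
        · intro k hk1 hk2
          rcases Nat.lt_or_ge k (src + 1) with h | h
          · have := hmid k (by omega) (by omega)
            rw [← hsv] at this; omega
          · rcases Nat.eq_or_lt_of_le hk2 with h2 | h2
            · rw [h2]
            · have := hspec.2.2.1 k h h2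
              omega
      · simp only [if_neg hjn]
        exact ih (n - (s + 1)) (by omega) (s + 1) rfl (s + 1) arr hlen
          (fun k hk => hsuf k (by omega)) (le_refl _) (Or.inl rfl)
          (hsuf (s + 1) (by omega)) (by omega)
  · simp only [hsn, if_false]

-- ===== VERDICT (by name: the statement is the Claim_ definition above) =====
theorem duplicate_array_spec : Claim_equal_duplicate_array := by
  intro A _
  unfold Spec_duplicate_array duplicate_array duplicate_array_alt
  exact sim A A.length rfl 0 0 A rfl (fun k _ => rfl) (le_refl _) (Or.inl rfl) rfl
    (by omega)
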